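-- pv_equiv track=rewrite | github.com/hari659tri/Python-ML- | teaversingdict.py | removekth
-- ===== SOURCE A (Python) =====
-- def removekth(s,k):
--     if(k>=len(s)):
--         return s
--     str=""
--     for i in range(len(s)):
--         if(i!=k):
--             str=str+s[i]
--
--     return str
-- ===== SOURCE B (Python) =====
-- def removekth(s, k):
--     if 0 <= k < len(s):
--         return s[:k] + s[k+1:]
--     return s
-- ===== Notes on version B (the rewrite author's own statement) =====
-- stated objective: simpler
-- what changed: Replaces the index loop that concatenates every non-k character one by one with a range guard and two slices s[:k] + s[k+1:].
import Mathlib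
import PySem

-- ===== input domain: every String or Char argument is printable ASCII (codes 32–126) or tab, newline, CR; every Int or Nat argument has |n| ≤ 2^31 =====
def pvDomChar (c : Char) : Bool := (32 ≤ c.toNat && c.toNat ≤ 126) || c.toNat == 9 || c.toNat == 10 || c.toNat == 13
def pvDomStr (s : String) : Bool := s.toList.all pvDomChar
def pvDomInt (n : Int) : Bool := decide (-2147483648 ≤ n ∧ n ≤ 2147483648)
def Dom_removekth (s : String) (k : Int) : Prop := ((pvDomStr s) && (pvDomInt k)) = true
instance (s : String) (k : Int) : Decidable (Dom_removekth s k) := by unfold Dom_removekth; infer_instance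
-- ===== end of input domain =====

-- B replaces A's quadratic character-by-character accumulation loop with two slices
-- guarded by a range check (objective: simpler; same return value everywhere).

-- ===== PORT A =====
def removekth (s : String) (k : Int) : String :=
  if k ≥ PySem.Str.len s then s
  else
    String.ofList
      ((PySem.List.pyRange 0 (PySem.Str.len s) 1).foldl
        (fun acc i => if i ≠ k then acc ++ [PySem.List.pyGetD s.toList i ' '] else acc) [])

-- ===== PORT B =====
def removekth_alt (s : String) (k : Int) : String :=
  if 0 ≤ k ∧ k < PySem.Str.len s then
    String.ofList (PySem.List.slice s.toList none (some k) ++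
                   PySem.List.slice s.toList (some (k + 1)) none)
  else s

-- ===== PRECONDITION & SPEC =====
def Spec_removekth (s : String) (k : Int) (out : String) : Prop := out = removekth_alt s k
instance (s : String) (k : Int) (out : String) : Decidable (Spec_removekth s k out) := by unfold Spec_removekth; infer_instance

-- ===== CLAIM (what is proved, stated in full; the proofs are below) =====
def Claim_equal_removekth : Prop := ∀ (s : String) (k : Int), Dom_removekth s k → Spec_removekth s k (removekth s k)

-- ===== LEMMAS AND PROOFS =====

-- A's loop body rewritten to the Bool-test form foldl_append_if expects.
lemma removekth_loop_bool (cs : List Char) (k : Int) (l : List Int) (acc : List Char) :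
    l.foldl (fun acc i => if i ≠ k then acc ++ [PySem.List.pyGetD cs i ' '] else acc) acc
      = l.foldl (fun acc i => if (i != k) = true then acc ++ [PySem.List.pyGetD cs i ' '] else acc) acc := by
  apply PySem.List.foldl_congr_mem
  intro a x _
  by_cases h : x = k <;> simp [h]

-- the loop keeps indices ≠ k, i.e. filters the range
lemma removekth_loop_eq_filter (cs : List Char) (k : Int) :
    (PySem.List.pyRange 0 ((cs.length : Int)) 1).foldl
      (fun acc i => if i ≠ k then acc ++ [PySem.List.pyGetD cs i ' '] else acc) []
    = ((PySem.List.pyRange 0 ((cs.length : Int)) 1).filter (· != k)).map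
        (fun i => PySem.List.pyGetD cs i ' ') := by
  rw [removekth_loop_bool, PySem.List.foldl_append_if]
  rfl

lemma filter_pyRange_all (a b k : Int) (h : k < a ∨ b ≤ k) :
    (PySem.List.pyRange a b 1).filter (· != k) = PySem.List.pyRange a b 1 := by
  apply List.filter_eq_self.2
  intro x hx
  rw [PySem.List.mem_pyRange_one] at hx
  simp only [bne_iff_ne, ne_eq]
  omega

-- loop result when k is outside [0, len): everything is kept, the string is rebuilt
lemma removekth_loop_out (cs : List Char) (k : Int) (h : k < 0 ∨ (cs.length : Int) ≤ k) :
    (PySem.List.pyRange 0 ((cs.length : Int)) 1).foldl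
      (fun acc i => if i ≠ k then acc ++ [PySem.List.pyGetD cs i ' '] else acc) [] = cs := by
  rw [removekth_loop_eq_filter, filter_pyRange_all 0 _ k (by omega)]
  have := PySem.List.map_pyGetD_pyRange cs ' ' (a := 0) le_rfl
  simpa using this

-- map of pyGetD over pyRange 0 k is the k-prefix (0 ≤ k ≤ len)
lemma map_pyGetD_pyRange_take (cs : List Char) (k : Int) (h0 : 0 ≤ k) (h1 : k ≤ (cs.length : Int)) :
    (PySem.List.pyRange 0 k 1).map (fun i => PySem.List.pyGetD cs i ' ') = cs.take k.toNat := by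
  have hlen : (cs.take k.toNat).length = k.toNat := by simp; omega
  have hk : (PySem.List.len (cs.take k.toNat)) = k := by
    simp [PySem.List.len, hlen]; omega
  have hbase := PySem.List.map_pyGetD_pyRange (cs.take k.toNat) ' ' (a := 0) le_rfl
  rw [hk] at hbase
  simp only [Int.toNat_zero, List.drop_zero] at hbase
  rw [← hbase]
  apply List.map_congr_left
  intro i hi
  rw [PySem.List.mem_pyRange_one] at hi
  rw [PySem.List.pyGetD_eq_getElem cs ' ' hi.1 (by omega),
      PySem.List.pyGetD_eq_getElem (cs.take k.toNat) ' ' hi.1 (by simp [hlen]; omega)]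
  exact (List.getElem_take).symm

-- loop result when 0 ≤ k < len: prefix before k, then suffix after k
lemma removekth_loop_in (cs : List Char) (k : Int) (h0 : 0 ≤ k) (h1 : k < (cs.length : Int)) :
    (PySem.List.pyRange 0 ((cs.length : Int)) 1).foldl
      (fun acc i => if i ≠ k then acc ++ [PySem.List.pyGetD cs i ' '] else acc) []
    = cs.take k.toNat ++ cs.drop (k + 1).toNat := by
  rw [removekth_loop_eq_filter]
  have hsplit : PySem.List.pyRange 0 ((cs.length : Int)) 1
      = PySem.List.pyRange 0 k 1 ++ (k :: PySem.List.pyRange (k + 1) ((cs.length : Int)) 1) := by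
    rw [PySem.List.pyRange_one_append 0 k ((cs.length : Int)) h0 (by omega)]
    congr 1
    rw [PySem.List.pyRange_one_cons (show k < (cs.length : Int) by omega)]
  rw [hsplit, List.filter_append, List.filter_cons]
  rw [filter_pyRange_all 0 k k (by omega), filter_pyRange_all (k + 1) _ k (by omega)]
  simp only [bne_self_eq_false, Bool.false_eq_true, ite_false]
  rw [List.map_append, map_pyGetD_pyRange_take cs k h0 (by omega)]
  congr 1
  simpa using PySem.List.map_pyGetD_pyRange cs ' ' (a := k + 1) (by omega)

-- ===== VERDICT (by name: the statement is the Claim_ definition above) =====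
theorem removekth_spec : Claim_equal_removekth := by
  intro s k _
  unfold Spec_removekth removekth removekth_alt
  rw [PySem.Str.len_eq]
  by_cases hge : k ≥ (s.toList.length : Int)
  · rw [if_pos hge, if_neg (by omega)]
  · rw [if_neg hge]
    by_cases h0 : 0 ≤ k
    · rw [if_pos ⟨h0, by omega⟩]
      rw [removekth_loop_in s.toList k h0 (by omega)]
      rw [PySem.List.slice_to s.toList h0, PySem.List.slice_from s.toList (by omega)]
    · rw [if_neg (by omega)]
      rw [removekth_loop_out s.toList k (Or.inl (by omega))]
      exact String.ofList_toList
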